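-- pv_equiv track=rewrite | github.com/SoulViolin/Advent-of-Code-2023 | Quest-3/Part-2/main.py | findGearRatios
-- ===== SOURCE A (Python) =====
-- def findGearRatios(data):
--     result = []
--     coordinates = {}
--
--     # Creating a dictionary where the keys will be coordinates and the values will be an array of values
--     for value, coords in data:
--         if coords in coordinates:
--             coordinates[coords].append(value)
--         else:
--             coordinates[coords] = [value]
--
--     # Iterate over the coordinates and multiply the elements of the array, if there are more than one
--     for coords, values in coordinates.items():
--         if len(values) > 1:
--             product = 1
--             for val in values:
--                 product *= val
--             result.append(product)
--
--     return result
-- ===== SOURCE B (Python) =====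
-- def findGearRatios(data):
--     # Dict-free brute force: at each first occurrence of a coordinate, scan the
--     # whole list for that coordinate's values and emit their product if >= 2.
--     result = []
--     for i, (_, coords) in enumerate(data):
--         if all(c != coords for _, c in data[:i]):
--             group = [v for v, c in data if c == coords]
--             if len(group) > 1:
--                 product = 1
--                 for v in group:
--                     product *= v
--                 result.append(product)
--     return result
-- ===== Notes on version B (the rewrite author's own statement) =====
-- stated objective: alternative
-- what changed: B removes A's dictionary grouping entirely: it makes a quadratic pass that detects each coordinate's first occurrence by scanning the prefix and gathers that coordinate's values by a full list scan, emitting products in the same first-occurrence order.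
import Mathlib
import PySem

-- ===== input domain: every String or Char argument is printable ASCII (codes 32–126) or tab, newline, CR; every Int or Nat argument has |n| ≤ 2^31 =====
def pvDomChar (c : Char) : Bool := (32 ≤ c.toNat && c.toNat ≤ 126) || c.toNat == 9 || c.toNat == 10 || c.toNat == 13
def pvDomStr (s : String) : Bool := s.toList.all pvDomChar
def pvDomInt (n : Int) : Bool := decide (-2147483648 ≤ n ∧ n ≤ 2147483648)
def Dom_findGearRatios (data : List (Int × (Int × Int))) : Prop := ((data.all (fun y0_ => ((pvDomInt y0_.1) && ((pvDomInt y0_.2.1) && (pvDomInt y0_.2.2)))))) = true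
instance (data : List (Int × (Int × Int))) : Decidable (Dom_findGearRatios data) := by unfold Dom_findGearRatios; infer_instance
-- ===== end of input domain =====

-- B drops A's dictionary entirely: it detects each coordinate's first occurrence by scanning the prefix and gathers its values by a full scan; objective: alternative (no hashing, O(n^2) vs A's O(n)).


-- ===== PORT A =====
def findGearRatios (data : List (Int × (Int × Int))) : List Int :=
  let coordinates : PySem.Dict (Int × Int) (List Int) :=
    data.foldl (fun d p =>
      match d.get? p.2 with
      | some vs => d.insert p.2 (vs ++ [p.1])   -- coordinates[coords].append(value): in-place, keeps position
      | none    => d.insert p.2 [p.1]) PySem.Dict.empty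
  coordinates.items.foldl (fun result kv =>
    if 1 < kv.2.length then
      result ++ [kv.2.foldl (fun product val => product * val) 1]
    else result) []

-- ===== PORT B =====
def findGearRatios_alt (data : List (Int × (Int × Int))) : List Int :=
  (PySem.List.enumerate data).foldl (fun result ip =>
    if (PySem.List.slice data none (some ip.1)).all (fun q => !(q.2 == ip.2.2)) then
      let group := (data.filter (fun q => q.2 == ip.2.2)).map (·.1)
      if 1 < group.length then
        result ++ [group.foldl (fun product v => product * v) 1]
      else result
    else result) []

-- ===== PRECONDITION & SPEC =====
def Spec_findGearRatios (data : List (Int × (Int × Int))) (out : List Int) : Prop := out = findGearRatios_alt data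
instance (data : List (Int × (Int × Int))) (out : List Int) : Decidable (Spec_findGearRatios data out) := by unfold Spec_findGearRatios; infer_instance

-- ===== CLAIM (what is proved, stated in full; the proofs are below) =====
def Claim_equal_findGearRatios : Prop := ∀ (data : List (Int × (Int × Int))), Dom_findGearRatios data → Spec_findGearRatios data (findGearRatios data)

-- ===== LEMMAS AND PROOFS =====

-- proof-only: coordinates in first-occurrence order
def pvKeys (l : List (Int × (Int × Int))) : List (Int × Int) :=
  l.foldl (fun ks p => if p.2 ∈ ks then ks else ks ++ [p.2]) []

-- proof-only: all values recorded at a coordinate, in data order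
def pvVals (l : List (Int × (Int × Int))) (c : Int × Int) : List Int :=
  (l.filter (fun q => q.2 == c)).map (·.1)

theorem pvKeys_mem_aux (l : List (Int × (Int × Int))) (ks : List (Int × Int)) (c : Int × Int) :
    c ∈ l.foldl (fun ks p => if p.2 ∈ ks then ks else ks ++ [p.2]) ks ↔ c ∈ ks ∨ c ∈ l.map (·.2) := by
  induction l generalizing ks with
  | nil => simp
  | cons p tl ih =>
    simp only [List.foldl_cons, List.map_cons, List.mem_cons, ih]
    by_cases h : p.2 ∈ ks
    · simp only [h, if_true]
      constructor
      · tauto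
      · rintro (hks | rfl | htl)
        · exact Or.inl hks
        · exact Or.inl h
        · exact Or.inr htl
    · simp [h]
      tauto

theorem pvKeys_mem (l : List (Int × (Int × Int))) (c : Int × Int) :
    c ∈ pvKeys l ↔ c ∈ l.map (·.2) := by
  simpa using pvKeys_mem_aux l [] c

theorem pvKeys_append (l : List (Int × (Int × Int))) (p : Int × (Int × Int)) :
    pvKeys (l ++ [p]) = if p.2 ∈ pvKeys l then pvKeys l else pvKeys l ++ [p.2] := by
  simp [pvKeys, List.foldl_append]

theorem pvVals_append (l : List (Int × (Int × Int))) (p : Int × (Int × Int)) (c : Int × Int) :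
    pvVals (l ++ [p]) c = pvVals l c ++ (if p.2 == c then [p.1] else []) := by
  by_cases h : p.2 == c <;> simp [pvVals, h]

theorem pvGet_mapform (keys : List (Int × Int)) (f : Int × Int → List Int) (k : Int × Int) :
    (PySem.Dict.mk (keys.map (fun c => (c, f c)))).get? k
      = if k ∈ keys then some (f k) else none := by
  induction keys with
  | nil => rfl
  | cons c tl ih =>
    simp only [List.map_cons, PySem.Dict.get?_mk_cons, List.mem_cons]
    by_cases h : c = k
    · subst h; simp
    · have hb : (c == k) = false := by simp [h]
      have hkc : ¬ (k = c) := fun hh => h hh.symm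
      simp [hb, ih, hkc]

-- A's grouping loop builds exactly the first-occurrence keys with their filtered values
theorem pvDictA_items (l : List (Int × (Int × Int))) :
    (l.foldl (fun d p =>
      match d.get? p.2 with
      | some vs => d.insert p.2 (vs ++ [p.1])
      | none    => d.insert p.2 [p.1]) PySem.Dict.empty)
    = PySem.Dict.mk ((pvKeys l).map (fun c => (c, pvVals l c))) := by
  induction l using List.reverseRecOn with
  | nil => rfl
  | append_singleton xs p ih =>
    rw [List.foldl_append, List.foldl_cons, List.foldl_nil, ih, pvGet_mapform]
    by_cases h : p.2 ∈ pvKeys xs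
    · rw [if_pos h]
      apply PySem.Dict.ext
      have hc : (PySem.Dict.mk ((pvKeys xs).map (fun c => (c, pvVals xs c)))).contains p.2 = true := by
        rw [PySem.Dict.contains_eq_isSome_get?, pvGet_mapform, if_pos h]; rfl
      rw [PySem.Dict.items_insert, hc, if_pos rfl]
      show ((pvKeys xs).map (fun c => (c, pvVals xs c))).map _
        = (pvKeys (xs ++ [p])).map (fun c => (c, pvVals (xs ++ [p]) c))
      rw [pvKeys_append, if_pos h, List.map_map]
      apply List.map_congr_left
      intro c _
      by_cases hk : c = p.2
      · subst hk; simp [pvVals_append]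
      · have : (c == p.2) = false := by simp [hk]
        simp [pvVals_append, Ne.symm hk, hk]
    · rw [if_neg h]
      apply PySem.Dict.ext
      have hc : (PySem.Dict.mk ((pvKeys xs).map (fun c => (c, pvVals xs c)))).contains p.2 = false := by
        rw [PySem.Dict.contains_eq_isSome_get?, pvGet_mapform, if_neg h]; rfl
      rw [PySem.Dict.items_insert, hc, if_neg (by simp)]
      show ((pvKeys xs).map (fun c => (c, pvVals xs c))) ++ [(p.2, [p.1])]
        = (pvKeys (xs ++ [p])).map (fun c => (c, pvVals (xs ++ [p]) c))
      rw [pvKeys_append, if_neg h, List.map_append]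
      have hnil : pvVals xs p.2 = [] := by
        simp only [pvVals]
        rw [List.map_eq_nil_iff, List.filter_eq_nil_iff]
        intro q hq
        simp only [beq_iff_eq]
        intro hqc
        exact h ((pvKeys_mem xs p.2).2 (List.mem_map.2 ⟨q, hq, hqc⟩))
      congr 1
      · apply List.map_congr_left
        intro c hcmem
        have hne : p.2 ≠ c := fun hh => h (hh ▸ hcmem)
        have : (p.2 == c) = false := by simp [hne]
        simp [pvVals_append, this]
      · simp [pvVals_append, hnil]

-- B's loop over enumerated indices visits exactly the first-occurrence keys, in order
theorem pvB_fold (data : List (Int × (Int × Int))) (g : List Int → (Int × Int) → List Int) (acc : List Int) :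
    (PySem.List.enumerate data).foldl (fun res ip =>
      if (PySem.List.slice data none (some ip.1)).all (fun q => !(q.2 == ip.2.2)) then g res ip.2.2 else res) acc
    = (pvKeys data).foldl g acc := by
  induction data using List.reverseRecOn with
  | nil => rfl
  | append_singleton xs p ih =>
    rw [PySem.List.enumerate_append, List.foldl_append]
    have hstep : ∀ (a : List Int), ∀ ip ∈ PySem.List.enumerate xs 0,
        (if (PySem.List.slice (xs ++ [p]) none (some ip.1)).all (fun q => !(q.2 == ip.2.2)) then g a ip.2.2 else a)
        = (if (PySem.List.slice xs none (some ip.1)).all (fun q => !(q.2 == ip.2.2)) then g a ip.2.2 else a) := by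
      intro a ip hip
      obtain ⟨k, hk, rfl⟩ := (PySem.List.mem_enumerate_iff xs 0 ip).1 hip
      have : PySem.List.slice (xs ++ [p]) none (some ((0 : Int) + k)) = PySem.List.slice xs none (some ((0 : Int) + k)) := by
        have h0 : ((0 : Int) + (k : Int)) = ((k : Nat) : Int) := by ring
        rw [h0, PySem.List.slice_to_natCast, PySem.List.slice_to_natCast,
            List.take_append_of_le_length (le_of_lt hk)]
      rw [this]
    rw [PySem.List.foldl_congr_mem (PySem.List.enumerate xs) _ _ acc hstep, ih]
    have hsl : PySem.List.slice (xs ++ [p]) none (some ((0 : Int) + xs.length)) = xs := by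
      have h0 : ((0 : Int) + (xs.length : Int)) = ((xs.length : Nat) : Int) := by ring
      rw [h0, PySem.List.slice_to_natCast, List.take_left]
    simp only [PySem.List.enumerate_cons, PySem.List.enumerate_nil, List.foldl_cons, List.foldl_nil, hsl]
    rw [pvKeys_append]
    by_cases h : p.2 ∈ pvKeys xs
    · have : xs.all (fun q => !(q.2 == p.2)) = false := by
        rw [pvKeys_mem] at h
        obtain ⟨q, hq, hqc⟩ := List.mem_map.1 h
        apply Bool.eq_false_iff.mpr
        simp only [ne_eq, List.all_eq_true]
        intro hall
        have hb := hall q hq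
        simp [hqc] at hb
      simp [h, this]
    · have : xs.all (fun q => !(q.2 == p.2)) = true := by
        rw [List.all_eq_true]
        intro q hq
        simp only [Bool.not_eq_eq_eq_not, Bool.not_true, beq_eq_false_iff_ne]
        intro hqc
        exact h ((pvKeys_mem xs p.2).2 (List.mem_map.2 ⟨q, hq, hqc⟩))
      simp [h, this, List.foldl_append]

-- ===== VERDICT (by name: the statement is the Claim_ definition above) =====
theorem findGearRatios_spec : Claim_equal_findGearRatios := by
  intro data _
  unfold Spec_findGearRatios
  simp only [findGearRatios, findGearRatios_alt]
  rw [pvDictA_items, pvB_fold data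
    (fun res c =>
      let group := (data.filter (fun q => q.2 == c)).map (·.1)
      if 1 < group.length then res ++ [group.foldl (fun product v => product * v) 1] else res) []]
  show (((pvKeys data).map (fun c => (c, pvVals data c))).foldl _ []) = _
  rw [List.foldl_map]
  rfl
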